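-- pv_equiv track=rewrite | github.com/scipy/scipy | Lib/sandbox/numexpr/compiler.py | sigPerms
-- ===== SOURCE A (Python) =====
-- def sigPerms(s):
--     """Generate all possible signatures derived by upcasting the given
--     signature.
--     """
--     codes = 'bifc'
--     if not s:
--         yield ''
--     elif s[0] in codes:
--         start = codes.index(s[0])
--         for x in codes[start:]:
--             for y in sigPerms(s[1:]):
--                 yield x + y
--     else:
--         yield s
-- ===== SOURCE B (Python) =====
-- def sigPerms(s):
--     """Generate all possible signatures derived by upcasting the given
--     signature.
--     """
--     codes = 'bifc'
--     k = 0
--     while k < len(s) and s[k] in codes: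
--         k += 1
--     opts = [codes[codes.index(s[i]):] for i in range(k)]
--     suffix = s[k:]
--     combos = [suffix]
--     for opt in reversed(opts):
--         combos = [x + rest for x in opt for rest in combos]
--     for sig in combos:
--         yield sig
-- ===== Notes on version B (the rewrite author's own statement) =====
-- stated objective: alternative
-- what changed: Replaces A's recursion with an explicit options table (one upcast-tail per leading code char) plus an iterative cartesian product over that table, with the non-code suffix appended verbatim.
import Mathlib
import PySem

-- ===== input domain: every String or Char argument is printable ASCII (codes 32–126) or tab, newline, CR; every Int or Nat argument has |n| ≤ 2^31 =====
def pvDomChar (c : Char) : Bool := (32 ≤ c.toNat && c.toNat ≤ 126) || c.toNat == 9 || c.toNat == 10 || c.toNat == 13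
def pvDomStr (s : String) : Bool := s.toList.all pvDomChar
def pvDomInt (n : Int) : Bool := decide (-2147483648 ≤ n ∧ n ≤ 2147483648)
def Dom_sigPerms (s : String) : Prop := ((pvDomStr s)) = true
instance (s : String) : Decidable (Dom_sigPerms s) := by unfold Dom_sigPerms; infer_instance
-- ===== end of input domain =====

-- B replaces A's recursion with an options table + iterative cartesian product (same cost, different decomposition); A is a generator in Python, compared here as the list of its yields.
-- ===== PORT A =====
def pvCodes : List Char := ['b','i','f','c']

def sigPermsCore : List Char → List (List Char)
  | [] => [[]]
  | c :: rest =>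
    if c ∈ pvCodes then
      (pvCodes.drop (pvCodes.idxOf c)).flatMap (fun x => (sigPermsCore rest).map (fun y => x :: y))
    else [c :: rest]

def sigPerms (s : String) : List String := (sigPermsCore s.toList).map String.mk


-- ===== PORT B =====
def pvStep (opt : List Char) (acc : List (List Char)) : List (List Char) :=
  opt.flatMap (fun x => acc.map (fun rest => x :: rest))

def sigPermsAltCore (l : List Char) : List (List Char) :=
  let pre := l.takeWhile (fun c => decide (c ∈ pvCodes))
  let suffix := l.dropWhile (fun c => decide (c ∈ pvCodes))
  let opts := pre.map (fun c => pvCodes.drop (pvCodes.idxOf c))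
  opts.foldr pvStep [suffix]

def sigPerms_alt (s : String) : List String := (sigPermsAltCore s.toList).map String.mk


-- ===== PRECONDITION & SPEC =====
def Spec_sigPerms (s : String) (out : List String) : Prop := out = sigPerms_alt s
instance (s : String) (out : List String) : Decidable (Spec_sigPerms s out) := by unfold Spec_sigPerms; infer_instance

-- ===== CLAIM (what is proved, stated in full; the proofs are below) =====
def Claim_equal_sigPerms : Prop := ∀ (s : String), Dom_sigPerms s → Spec_sigPerms s (sigPerms s)

-- ===== LEMMAS AND PROOFS =====
theorem core_eq (l : List Char) : sigPermsCore l = sigPermsAltCore l := by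
  induction l with
  | nil => simp [sigPermsCore, sigPermsAltCore]
  | cons c rest ih =>
    by_cases h : c ∈ pvCodes <;>
      simp [sigPermsCore, sigPermsAltCore, h, pvStep,
        ih, sigPermsAltCore]


-- ===== VERDICT (by name: the statement is the Claim_ definition above) =====
theorem sigPerms_spec : Claim_equal_sigPerms := by
  intro s _
  unfold Spec_sigPerms sigPerms sigPerms_alt
  rw [core_eq]
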